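-- pv_equiv track=rewrite | github.com/DrunkCowpoke/coms1270-code | MyCode_2/Assignments/Assignment 5/ultimateTODO.py | checkItem
-- ===== SOURCE A (Python) =====
-- def checkItem(item, todoList):
--
--     itemFound = False
--     keyName = ""
--     index = -1
--
-- # ---- For loop to find item and indexing for list -----
--     for key in todoList:
--         if item in todoList[key]:
--             itemFound = True
--             keyName = key
--             index = todoList[key].index(item)
--             break
--
--     return itemFound, keyName, index
-- ===== SOURCE B (Python) =====
-- def checkItem(item, todoList):
--     # Different algorithm: build a value -> (key, index) hash index by scanning
--     # keys and positions in reverse (earlier occurrences overwrite later ones),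
--     # then answer with a single dictionary lookup.
--     locator = {}
--     for key, vals in reversed(list(todoList.items())):
--         for i in range(len(vals) - 1, -1, -1):
--             locator[vals[i]] = (key, i)
--     if item in locator:
--         keyName, index = locator[item]
--         return True, keyName, index
--     return False, "", -1
-- ===== Notes on version B (the rewrite author's own statement) =====
-- stated objective: alternative
-- what changed: Instead of scanning each list for the item, B builds a value->(key,index) hash index in one reverse pass over all lists (earlier occurrences overwrite later ones) and answers with a single dictionary lookup.
import Mathlib
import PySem

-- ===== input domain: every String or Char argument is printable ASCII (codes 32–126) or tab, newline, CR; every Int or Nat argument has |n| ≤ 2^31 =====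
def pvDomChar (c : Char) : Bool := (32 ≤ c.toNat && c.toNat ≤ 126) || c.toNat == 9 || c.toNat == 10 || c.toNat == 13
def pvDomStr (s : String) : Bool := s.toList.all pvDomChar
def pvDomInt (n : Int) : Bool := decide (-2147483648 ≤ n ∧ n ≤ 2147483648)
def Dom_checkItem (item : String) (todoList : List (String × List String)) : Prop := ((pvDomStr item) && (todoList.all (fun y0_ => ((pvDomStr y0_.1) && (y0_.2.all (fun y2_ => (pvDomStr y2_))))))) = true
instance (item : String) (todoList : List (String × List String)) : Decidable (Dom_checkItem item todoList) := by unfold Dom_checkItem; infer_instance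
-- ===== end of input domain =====

-- B builds a value->(key,index) hash index in one reverse pass, then does a single lookup;
-- equivalence of the return value with A's first-key-wins scan is proved below.

-- ===== PORT A =====
-- for-loop over keys with break: first list containing item wins; membership test, then .index
def checkItem (item : String) (todoList : List (String × List String)) : Bool × String × Int :=
  match todoList with
  | [] => (false, "", -1)
  | (key, vs) :: rest =>
    if item ∈ vs then (true, key, ((PySem.List.index? vs item).getD 0 : Nat))
    else checkItem item rest

-- ===== PORT B =====
-- B: build locator = {value: (key, index)} by iterating keys reversed and indices downward
-- (so earliest key / smallest index is inserted last and wins), then one lookup.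

-- enum i vs = [(i, vs[0]), (i+1, vs[1]), …]  (the (index, value) pairs the inner loop visits)
def enumFrom (i : Nat) (vs : List String) : List (Nat × String) :=
  match vs with
  | [] => []
  | v :: rest => (i, v) :: enumFrom (i + 1) rest

-- inner loop: for i in range(len(vals)-1, -1, -1): locator[vals[i]] = (key, i)
-- processes the tail (higher indices) first, then inserts the head pair — the reverse order
def fillRev (key : String) (l : List (Nat × String)) (d : PySem.Dict String (String × Int)) :
    PySem.Dict String (String × Int) :=
  match l with
  | [] => d
  | x :: rest => (fillRev key rest d).insert x.2 (key, (x.1 : Int))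

-- outer loop: for key, vals in reversed(list(todoList.items())): … — later pairs processed first
def buildLocator (todoList : List (String × List String)) : PySem.Dict String (String × Int) :=
  match todoList with
  | [] => PySem.Dict.empty
  | (key, vs) :: rest => fillRev key (enumFrom 0 vs) (buildLocator rest)

def checkItem_alt (item : String) (todoList : List (String × List String)) : Bool × String × Int :=
  match (buildLocator todoList).get? item with
  | some (keyName, index) => (true, keyName, index)
  | none => (false, "", -1)

-- ===== PRECONDITION & SPEC =====
def Spec_checkItem (item : String) (todoList : List (String × List String)) (out : Bool × String × Int) : Prop := out = checkItem_alt item todoList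
instance (item : String) (todoList : List (String × List String)) (out : Bool × String × Int) : Decidable (Spec_checkItem item todoList out) := by unfold Spec_checkItem; infer_instance

-- ===== CLAIM (what is proved, stated in full; the proofs are below) =====
def Claim_equal_checkItem : Prop := ∀ (item : String) (todoList : List (String × List String)), Dom_checkItem item todoList → Spec_checkItem item todoList (checkItem item todoList)

-- ===== LEMMAS AND PROOFS =====
-- lookup after the reverse fill = first pair of l whose value is item (head inserted last wins)
theorem get?_fillRev (key : String) (l : List (Nat × String)) (d : PySem.Dict String (String × Int))
    (item : String) :
    (fillRev key l d).get? item =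
      match l.find? (fun x => x.2 == item) with
      | some x => some (key, (x.1 : Int))
      | none => d.get? item := by
  induction l with
  | nil => simp [fillRev]
  | cons x rest ih =>
    by_cases h : x.2 = item
    · simp [fillRev, PySem.Dict.get?_insert, h]
    · have hb : (x.2 == item) = false := by simp [h]
      simp [fillRev, PySem.Dict.get?_insert, Ne.symm h, ih, hb]

theorem find?_enumFrom (i : Nat) (vs : List String) (item : String) :
    (enumFrom i vs).find? (fun x => x.2 == item) =
      (List.idxOf? item vs).map (fun k => (i + k, item)) := by
  induction vs generalizing i with
  | nil => simp [enumFrom]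
  | cons v rest ih =>
    by_cases h : v = item
    · subst h; simp [enumFrom, List.idxOf?_cons]
    · have hb : (v == item) = false := by simp [h]
      simp only [enumFrom, List.find?_cons, hb, List.idxOf?_cons]
      simp only [ih]
      cases List.idxOf? item rest with
      | none => simp
      | some k => simp; omega

-- ===== VERDICT (by name: the statement is the Claim_ definition above) =====
theorem checkItem_spec : Claim_equal_checkItem := by
  unfold Claim_equal_checkItem Spec_checkItem
  intro item todoList hdm
  induction todoList with
  | nil => rfl
  | cons hd rest ih =>
    obtain ⟨key, vs⟩ := hd
    by_cases h : item ∈ vs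
    · obtain ⟨k, hk⟩ := Option.isSome_iff_exists.mp (List.isSome_idxOf?.mpr h)
      simp [checkItem, checkItem_alt, buildLocator, get?_fillRev, find?_enumFrom,
        PySem.List.index?_eq_idxOf?, h, hk]
    · have hn : List.idxOf? item vs = none := by simp [List.idxOf?_eq_none_iff, h]
      have hrest : Dom_checkItem item rest := by
        revert hdm; simp [Dom_checkItem]; tauto
      simp only [checkItem, checkItem_alt, buildLocator, get?_fillRev, find?_enumFrom,
        if_neg h, hn, Option.map_none]
      exact ih hrest
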